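-- pv_equiv track=rewrite | github.com/akhmadarief/Hitori-Encode-Pack | _copy/site-packages/finedehalo.py | _mk_coordinates_list
-- ===== SOURCE A (Python) =====
-- __square = (1, 1, 1, 1, 1, 1, 1, 1)
--
-- __horizontal = (0, 0, 0, 1, 1, 0, 0, 0)
--
-- __vertical = (0, 1, 0, 0, 0, 0, 1, 0)
--
-- __both = (0, 1, 0, 1, 1, 0, 1, 0)
--
-- RECTANGLE = 0
--
-- def _mk_coordinates_list(sw, sh, mode=RECTANGLE):
--     assert sw >= 0 and sh >= 0, "sw, sh: must be > 0"
--     assert 0 <= mode <= 2, "mode: 0 - rectangle, 1 - ellipse, 2 - losange"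
--
--     clist = []
--     while sw > 0 or sh > 0:
--         if sw > 0 and sh > 0:
--             if mode == 2 or (mode == 1 and (sw % 3) != 1):
--                 coordinates = __both
--             else:
--                 coordinates = __square
--         elif sw > 0:
--             coordinates = __horizontal
--         elif sh > 0:
--             coordinates = __vertical
--         sw -= 1
--         sh -= 1
--         clist.append(coordinates)
--     return clist
-- ===== SOURCE B (Python) =====
-- __square = (1, 1, 1, 1, 1, 1, 1, 1)
--
-- __horizontal = (0, 0, 0, 1, 1, 0, 0, 0)
--
-- __vertical = (0, 1, 0, 0, 0, 0, 1, 0)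
--
-- __both = (0, 1, 0, 1, 1, 0, 1, 0)
--
-- RECTANGLE = 0
--
-- def _mk_coordinates_list(sw, sh, mode=RECTANGLE):
--     assert sw >= 0 and sh >= 0, "sw, sh: must be > 0"
--     assert 0 <= mode <= 2, "mode: 0 - rectangle, 1 - ellipse, 2 - losange"
--
--     m = min(sw, sh)
--     clist = [__both if mode == 2 or (mode == 1 and (sw - c) % 3 != 1) else __square
--              for c in range(m)]
--     if sw > sh:
--         clist += [__horizontal] * (sw - sh)
--     elif sh > sw:
--         clist += [__vertical] * (sh - sw)
--     return clist
-- ===== Notes on version B (the rewrite author's own statement) =====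
-- stated objective: simpler
-- what changed: Replaces A's single while-loop with mutating sw/sh and an if/elif chain by a closed-form decomposition: a comprehension over range(min(sw,sh)) for the mixed phase plus a single replicated tail (__horizontal or __vertical) of length |sw-sh|.
import Mathlib
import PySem

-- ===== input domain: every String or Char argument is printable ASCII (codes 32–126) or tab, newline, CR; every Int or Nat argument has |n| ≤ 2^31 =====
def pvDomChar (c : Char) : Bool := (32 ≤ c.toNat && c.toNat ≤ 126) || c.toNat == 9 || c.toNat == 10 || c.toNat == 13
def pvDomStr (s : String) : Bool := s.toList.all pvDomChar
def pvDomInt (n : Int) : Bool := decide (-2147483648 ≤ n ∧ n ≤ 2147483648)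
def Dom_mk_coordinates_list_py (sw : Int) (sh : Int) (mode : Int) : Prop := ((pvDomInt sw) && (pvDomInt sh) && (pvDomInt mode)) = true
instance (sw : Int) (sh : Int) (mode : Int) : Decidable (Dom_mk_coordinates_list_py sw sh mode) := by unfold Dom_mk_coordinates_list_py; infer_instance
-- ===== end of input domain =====

-- B replaces A's while-loop (mutating sw/sh, if/elif chain) by a closed-form decomposition:
-- map over range(min sw sh) for the mixed phase, then a replicated uniform tail of length |sw - sh|.

-- ===== PORT A =====
def pySquare : List Int := [1, 1, 1, 1, 1, 1, 1, 1]
def pyHorizontal : List Int := [0, 0, 0, 1, 1, 0, 0, 0]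
def pyVertical : List Int := [0, 1, 0, 0, 0, 0, 1, 0]
def pyBoth : List Int := [0, 1, 0, 1, 1, 0, 1, 0]

-- the while loop of A, step for step (sw % 3 is Python's % : both operands' signs matter only
-- for sw < 0, which Pre_ excludes; on 0 ≤ sw Lean's Int.emod agrees with Python's %)
def pvLoopA (sw : Int) (sh : Int) (mode : Int) : List (List Int) :=
  if h : sw > 0 ∨ sh > 0 then
    (if sw > 0 ∧ sh > 0 then
       (if mode = 2 ∨ (mode = 1 ∧ sw % 3 ≠ 1) then pyBoth else pySquare)
     else if sw > 0 then pyHorizontal else pyVertical)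
    :: pvLoopA (sw - 1) (sh - 1) mode
  else []
termination_by (sw.toNat + sh.toNat)
decreasing_by omega

def mk_coordinates_list_py (sw : Int) (sh : Int) (mode : Int) : List (List Int) :=
  pvLoopA sw sh mode

-- ===== PORT B =====
-- element of B's list comprehension at index c
def pvBodyB (sw : Int) (mode : Int) (c : Nat) : List Int :=
  if mode = 2 ∨ (mode = 1 ∧ (sw - (c : Int)) % 3 ≠ 1) then pyBoth else pySquare

def mk_coordinates_list_py_alt (sw : Int) (sh : Int) (mode : Int) : List (List Int) :=
  (List.range (min sw sh).toNat).map (pvBodyB sw mode) ++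
    (if sw > sh then List.replicate (sw - sh).toNat pyHorizontal
     else if sh > sw then List.replicate (sh - sw).toNat pyVertical
     else [])

-- ===== PRECONDITION & SPEC =====
-- Pre_ is exactly A's two asserts: sw, sh nonnegative and mode in {0,1,2}; A raises AssertionError otherwise.
def Pre_mk_coordinates_list_py (sw : Int) (sh : Int) (mode : Int) : Prop :=
  0 ≤ sw ∧ 0 ≤ sh ∧ 0 ≤ mode ∧ mode ≤ 2
instance (sw : Int) (sh : Int) (mode : Int) : Decidable (Pre_mk_coordinates_list_py sw sh mode) := by
  unfold Pre_mk_coordinates_list_py; infer_instance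

def pvWitness_mk_coordinates_list_py : Int × Int × Int := (4, 2, 1)

def Spec_mk_coordinates_list_py (sw : Int) (sh : Int) (mode : Int) (out : List (List Int)) : Prop := out = mk_coordinates_list_py_alt sw sh mode
instance (sw : Int) (sh : Int) (mode : Int) (out : List (List Int)) : Decidable (Spec_mk_coordinates_list_py sw sh mode out) := by unfold Spec_mk_coordinates_list_py; infer_instance

-- ===== CLAIM (what is proved, stated in full; the proofs are below) =====
def Claim_equal_mk_coordinates_list_py : Prop := ∀ (sw : Int) (sh : Int) (mode : Int), Dom_mk_coordinates_list_py sw sh mode → Pre_mk_coordinates_list_py sw sh mode → Spec_mk_coordinates_list_py sw sh mode (mk_coordinates_list_py sw sh mode)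

-- ===== LEMMAS AND PROOFS =====

-- A's loop once sh has run out: pure horizontal tail
lemma pvLoopA_horiz (n : Nat) : ∀ (sw sh mode : Int), sw.toNat = n → sh ≤ 0 →
    pvLoopA sw sh mode = List.replicate n pyHorizontal := by
  induction n with
  | zero =>
    intro sw sh mode hn hs
    rw [pvLoopA]
    rw [dif_neg (by omega)]
    simp
  | succ k ih =>
    intro sw sh mode hn hs
    have hsw : 0 < sw := by omega
    rw [pvLoopA, dif_pos (Or.inl hsw)]
    rw [if_neg (by omega), if_pos hsw]
    rw [ih (sw - 1) (sh - 1) mode (by omega) (by omega)]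
    rfl

-- A's loop once sw has run out: pure vertical tail
lemma pvLoopA_vert (n : Nat) : ∀ (sw sh mode : Int), sh.toNat = n → sw ≤ 0 →
    pvLoopA sw sh mode = List.replicate n pyVertical := by
  induction n with
  | zero =>
    intro sw sh mode hn hs
    rw [pvLoopA, dif_neg (by omega)]
    rfl
  | succ k ih =>
    intro sw sh mode hn hs
    have hsh : 0 < sh := by omega
    rw [pvLoopA, dif_pos (Or.inr hsh)]
    rw [if_neg (by omega), if_neg (by omega)]
    rw [ih (sw - 1) (sh - 1) mode (by omega) (by omega)]
    rfl

-- B at sh = 0: just the horizontal tail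
lemma alt_sh_zero (sw mode : Int) (h : 0 ≤ sw) :
    mk_coordinates_list_py_alt sw 0 mode = List.replicate sw.toNat pyHorizontal := by
  unfold mk_coordinates_list_py_alt
  have hm : (min sw 0).toNat = 0 := by omega
  rw [hm]
  by_cases h0 : sw > 0
  · rw [if_pos h0]; simp
  · have : sw = 0 := by omega
    subst this
    simp

-- B at sw = 0: just the vertical tail
lemma alt_sw_zero (sh mode : Int) (h : 0 ≤ sh) :
    mk_coordinates_list_py_alt 0 sh mode = List.replicate sh.toNat pyVertical := by
  unfold mk_coordinates_list_py_alt
  have hm : (min (0:Int) sh).toNat = 0 := by omega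
  rw [hm]
  by_cases h0 : sh > 0
  · rw [if_neg (by omega), if_pos h0]; simp
  · have : sh = 0 := by omega
    subst this
    simp

-- B satisfies A's loop recurrence while both dimensions are positive
lemma alt_step (sw sh mode : Int) (hw : 0 < sw) (hh : 0 < sh) :
    mk_coordinates_list_py_alt sw sh mode =
      (if mode = 2 ∨ (mode = 1 ∧ sw % 3 ≠ 1) then pyBoth else pySquare)
        :: mk_coordinates_list_py_alt (sw - 1) (sh - 1) mode := by
  unfold mk_coordinates_list_py_alt
  have hm : (min sw sh).toNat = (min (sw - 1) (sh - 1)).toNat + 1 := by omega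
  rw [hm, List.range_succ_eq_map, List.map_cons, List.map_map]
  have hhead : pvBodyB sw mode 0 =
      (if mode = 2 ∨ (mode = 1 ∧ sw % 3 ≠ 1) then pyBoth else pySquare) := by
    unfold pvBodyB; norm_num
  have hmap : (pvBodyB sw mode) ∘ Nat.succ = pvBodyB (sw - 1) mode := by
    funext c
    unfold pvBodyB
    have : sw - ((c : Int) + 1) = sw - 1 - (c : Int) := by ring
    simp only [Function.comp, Nat.succ_eq_add_one]
    push_cast
    rw [this]
  have htail :
      (if sw > sh then List.replicate (sw - sh).toNat pyHorizontal
       else if sh > sw then List.replicate (sh - sw).toNat pyVertical else []) =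
      (if sw - 1 > sh - 1 then List.replicate (sw - 1 - (sh - 1)).toNat pyHorizontal
       else if sh - 1 > sw - 1 then List.replicate (sh - 1 - (sw - 1)).toNat pyVertical else []) := by
    have e1 : (sw - sh) = (sw - 1 - (sh - 1)) := by ring
    have e2 : (sh - sw) = (sh - 1 - (sw - 1)) := by ring
    by_cases h1 : sw > sh
    · rw [if_pos h1, if_pos (show sw - 1 > sh - 1 by omega), e1]
    · rw [if_neg h1, if_neg (show ¬ sw - 1 > sh - 1 by omega)]
      by_cases h2 : sh > sw
      · rw [if_pos h2, if_pos (show sh - 1 > sw - 1 by omega), e2]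
      · rw [if_neg h2, if_neg (show ¬ sh - 1 > sw - 1 by omega)]
  rw [hhead, hmap, htail]
  simp

lemma pvMain (n : Nat) : ∀ (sw sh mode : Int), 0 ≤ sw → 0 ≤ sh → sh.toNat = n →
    pvLoopA sw sh mode = mk_coordinates_list_py_alt sw sh mode := by
  induction n with
  | zero =>
    intro sw sh mode hw hh hn
    have : sh = 0 := by omega
    subst this
    rw [alt_sh_zero sw mode hw, pvLoopA_horiz sw.toNat sw 0 mode rfl le_rfl]
  | succ k ih =>
    intro sw sh mode hw hh hn
    by_cases hsw : 0 < sw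
    · have hsh : 0 < sh := by omega
      rw [pvLoopA, dif_pos (Or.inl hsw), if_pos ⟨hsw, hsh⟩]
      rw [alt_step sw sh mode hsw hsh]
      rw [ih (sw - 1) (sh - 1) mode (by omega) (by omega) (by omega)]
    · have : sw = 0 := by omega
      subst this
      rw [alt_sw_zero sh mode hh, pvLoopA_vert sh.toNat 0 sh mode rfl le_rfl]

-- ===== VERDICT (by name: the statement is the Claim_ definition above) =====
theorem mk_coordinates_list_py_spec : Claim_equal_mk_coordinates_list_py := by
  intro sw sh mode _ hpre
  unfold Spec_mk_coordinates_list_py mk_coordinates_list_py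
  exact pvMain sh.toNat sw sh mode hpre.1 hpre.2.1 rfl
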